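-- pv_equiv track=rewrite | github.com/Sarvind1/pdf-document-scanner | lambda_handler_no_textract.py | _normalize_ocr_digits
-- ===== SOURCE A (Python) =====
-- def _normalize_ocr_digits(text: str) -> str:
--     """
--     Normalize common OCR errors in digit strings
--     O->0, I/l->1, S->5, B->8
--     """
--     # Only normalize characters that look like numbers
--     replacements = {
--         'O': '0',
--         'o': '0',
--         'I': '1',
--         'l': '1',
--         'S': '5',
--         's': '5',
--         'B': '8'
--     }
--     result = text
--     for old, new in replacements.items():
--         result = result.replace(old, new)
--     return result
-- ===== SOURCE B (Python) =====
-- def _normalize_ocr_digits(text: str) -> str: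
--     """
--     Normalize common OCR errors in digit strings
--     O->0, I/l->1, S->5, B->8
--     """
--     replacements = {
--         'O': '0',
--         'o': '0',
--         'I': '1',
--         'l': '1',
--         'S': '5',
--         's': '5',
--         'B': '8'
--     }
--     # Single pass: one table lookup per character instead of seven whole-string scans.
--     return ''.join(replacements.get(c, c) for c in text)
-- ===== Notes on version B (the rewrite author's own statement) =====
-- stated objective: simpler
-- what changed: One single pass over the characters, looking each character up in the replacements table, instead of seven sequential whole-string replace scans that each rebuild the string.
import Mathlib
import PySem

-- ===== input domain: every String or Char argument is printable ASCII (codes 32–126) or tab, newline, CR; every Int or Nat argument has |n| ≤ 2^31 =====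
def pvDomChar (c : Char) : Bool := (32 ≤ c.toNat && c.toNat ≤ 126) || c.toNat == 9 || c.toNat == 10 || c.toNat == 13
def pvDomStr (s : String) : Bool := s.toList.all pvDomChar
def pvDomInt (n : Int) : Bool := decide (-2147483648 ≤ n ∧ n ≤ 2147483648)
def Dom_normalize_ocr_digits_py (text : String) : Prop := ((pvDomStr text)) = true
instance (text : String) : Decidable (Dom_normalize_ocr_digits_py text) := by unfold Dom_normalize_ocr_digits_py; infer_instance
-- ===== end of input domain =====

-- B replaces A's seven sequential whole-string .replace scans by one pass with a per-character table lookup (objective: simpler).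

-- ===== PORT A =====
-- the dict literal from A, in insertion order
def pvRepl : PySem.Dict Char Char :=
  PySem.Dict.mk [('O', '0'), ('o', '0'), ('I', '1'), ('l', '1'), ('S', '5'), ('s', '5'), ('B', '8')]

-- result = text; for old, new in replacements.items(): result = result.replace(old, new)
def normalize_ocr_digits_py (text : String) : String :=
  pvRepl.items.foldl (fun result (p : Char × Char) =>
    PySem.Str.replace result (String.ofList [p.1]) (String.ofList [p.2])) text

-- ===== PORT B =====
-- return ''.join(replacements.get(c, c) for c in text)
def normalize_ocr_digits_py_alt (text : String) : String :=
  String.ofList (text.toList.map (fun c => (PySem.Dict.get? pvRepl c).getD c))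

-- ===== PRECONDITION & SPEC =====
def Spec_normalize_ocr_digits_py (text : String) (out : String) : Prop := out = normalize_ocr_digits_py_alt text
instance (text : String) (out : String) : Decidable (Spec_normalize_ocr_digits_py text out) := by unfold Spec_normalize_ocr_digits_py; infer_instance

-- ===== CLAIM (what is proved, stated in full; the proofs are below) =====
def Claim_equal_normalize_ocr_digits_py : Prop := ∀ (text : String), Dom_normalize_ocr_digits_py text → Spec_normalize_ocr_digits_py text (normalize_ocr_digits_py text)

-- ===== LEMMAS AND PROOFS =====

-- replace.go with a single-char pattern is a map over the remaining characters
theorem go_single (o n : Char) : ∀ (l : List Char) (fuel : Nat) (acc : List Char),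
    l.length ≤ fuel →
    PySem.Chars.replace.go [o] [n] fuel l acc
      = acc.reverse ++ l.map (fun c => if c = o then n else c) := by
  intro l
  induction l with
  | nil =>
    intro fuel acc _
    cases fuel <;> simp [PySem.Chars.replace.go]
  | cons c t ih =>
    intro fuel acc h
    cases fuel with
    | zero => simp at h
    | succ f =>
      simp only [PySem.Chars.replace.go]
      by_cases hc : c = o
      · subst hc
        rw [if_pos (by simp [List.isPrefixOf])]
        have := ih f (n :: acc) (by simp at h; omega)
        simpa using this
      · rw [if_neg (by simp [List.isPrefixOf]; exact fun e => hc e.symm)]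
        have := ih f (c :: acc) (by simpa using Nat.le_of_succ_le_succ h)
        simpa [hc] using this

-- one elementary replacement step
def pvStep (o n c : Char) : Char := if c = o then n else c

-- str.replace with single-char old/new is a per-character map
theorem replace_single (s : List Char) (o n : Char) :
    PySem.Chars.replace s [o] [n] = s.map (pvStep o n) := by
  rw [PySem.Chars.replace, if_neg (by simp)]
  exact go_single o n s s.length [] (le_refl _)

-- the seven cascaded steps equal one table lookup
theorem table_eq (c : Char) :
    pvStep 'B' '8' (pvStep 's' '5' (pvStep 'S' '5' (pvStep 'l' '1'
      (pvStep 'I' '1' (pvStep 'o' '0' (pvStep 'O' '0' c))))))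
      = (PySem.Dict.get? pvRepl c).getD c := by
  by_cases h1 : c = 'O'; · subst h1; decide
  by_cases h2 : c = 'o'; · subst h2; decide
  by_cases h3 : c = 'I'; · subst h3; decide
  by_cases h4 : c = 'l'; · subst h4; decide
  by_cases h5 : c = 'S'; · subst h5; decide
  by_cases h6 : c = 's'; · subst h6; decide
  by_cases h7 : c = 'B'; · subst h7; decide
  have e1 : ('O' == c) = false := by simp [Ne.symm h1]
  have e2 : ('o' == c) = false := by simp [Ne.symm h2]
  have e3 : ('I' == c) = false := by simp [Ne.symm h3]
  have e4 : ('l' == c) = false := by simp [Ne.symm h4]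
  have e5 : ('S' == c) = false := by simp [Ne.symm h5]
  have e6 : ('s' == c) = false := by simp [Ne.symm h6]
  have e7 : ('B' == c) = false := by simp [Ne.symm h7]
  simp [pvStep, PySem.Dict.get?, pvRepl, List.find?, h1, h2, h3, h4, h5, h6, h7,
    e1, e2, e3, e4, e5, e6, e7]

theorem normalize_ocr_digits_py_spec : Claim_equal_normalize_ocr_digits_py := by
  intro text _
  unfold Spec_normalize_ocr_digits_py normalize_ocr_digits_py normalize_ocr_digits_py_alt pvRepl
  simp only [List.foldl_cons, List.foldl_nil, PySem.Str.replace,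
    String.toList_ofList, replace_single, List.map_map]
  refine congrArg String.ofList (List.map_congr_left ?_)
  intro c _
  simp only [Function.comp_apply]
  exact table_eq c
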